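-- pv_equiv track=rewrite | github.com/tsani/coding-cat-public | remove-vowels-once/mutation_5.py | remove_vowels_once
-- ===== SOURCE A (Python) =====
-- def remove_vowels_once(word: str) -> str:
--     '''
--     letters separated in the form of a set
--     '''
--     vowels = "aeiouyAEIOUY"
--     seen_vowels = set()
--     result = []
--     for char in word:
--         if char in vowels:
--             if char not in seen_vowels:
--                 seen_vowels.add(char)
--             else:
--                 result.append(char)
--         else:
--             result.append(char)
--     return result
-- ===== SOURCE B (Python) =====
-- def remove_vowels_once(word: str) -> str:
--     vowels = "aeiouyAEIOUY"
--     drop = {word.index(v) for v in vowels if v in word}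
--     return [c for i, c in enumerate(word) if i not in drop]
-- ===== Notes on version B (the rewrite author's own statement) =====
-- stated objective: simpler
-- what changed: Replaces the inline seen-set state machine with a two-phase decomposition: first build the set of indices to drop (word.index of each distinct vowel present), then one enumerate-filter pass keeps every character whose index is not in that set.
import Mathlib
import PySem

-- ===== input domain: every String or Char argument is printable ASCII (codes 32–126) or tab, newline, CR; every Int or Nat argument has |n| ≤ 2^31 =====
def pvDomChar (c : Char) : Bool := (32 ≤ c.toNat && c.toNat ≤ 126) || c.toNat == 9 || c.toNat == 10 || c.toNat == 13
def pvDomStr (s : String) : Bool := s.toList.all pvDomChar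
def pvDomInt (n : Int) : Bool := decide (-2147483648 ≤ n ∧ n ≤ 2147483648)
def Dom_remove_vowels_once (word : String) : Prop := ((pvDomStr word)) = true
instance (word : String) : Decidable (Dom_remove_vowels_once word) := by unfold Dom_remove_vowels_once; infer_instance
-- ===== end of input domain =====

-- B replaces A's inline seen-set state machine with a drop-index-set-then-filter decomposition; return value only (no mutation).

-- ===== PORT A =====
-- 'char in vowels' / 'v in word' on a single character is exactly list membership of that character.
def remove_vowels_once (word : String) : List String :=
  let vowels : List Char := "aeiouyAEIOUY".toList
  (word.toList.foldl (fun (st : PySem.Set Char × List String) char =>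
    if vowels.contains char then
      if !(PySem.Set.contains st.1 char) then
        (PySem.Set.add st.1 char, st.2)
      else
        (st.1, st.2 ++ [String.mk [char]])
    else
      (st.1, st.2 ++ [String.mk [char]])) (PySem.Set.empty, [])).2

-- ===== PORT B =====
def remove_vowels_once_alt (word : String) : List String :=
  let vowels : List Char := "aeiouyAEIOUY".toList
  let drop : PySem.Set Int :=
    PySem.Set.ofList ((vowels.filter (fun v => word.toList.contains v)).map
      (fun v => PySem.Chars.find word.toList [v]))
  ((PySem.List.enumerate word.toList 0).filter
      (fun p => !(PySem.Set.contains drop p.1))).map (fun p => String.mk [p.2])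

-- ===== PRECONDITION & SPEC =====
def Spec_remove_vowels_once (word : String) (out : List String) : Prop := out = remove_vowels_once_alt word
instance (word : String) (out : List String) : Decidable (Spec_remove_vowels_once word out) := by unfold Spec_remove_vowels_once; infer_instance

-- ===== CLAIM (what is proved, stated in full; the proofs are below) =====
def Claim_equal_remove_vowels_once : Prop := ∀ (word : String), Dom_remove_vowels_once word → Spec_remove_vowels_once word (remove_vowels_once word)

-- ===== LEMMAS AND PROOFS =====

-- canonical form: walk the word keeping the processed prefix; drop a vowel exactly at its first occurrence
def pvSpecGo (pre : List Char) : List Char → List String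
  | [] => []
  | c :: t =>
    if ("aeiouyAEIOUY".toList.contains c && !(pre.contains c)) then pvSpecGo (pre ++ [c]) t
    else String.mk [c] :: pvSpecGo (pre ++ [c]) t

lemma pvContains_append (l : List Char) (c x : Char) :
    (l ++ [c]).contains x = (l.contains x || x == c) := by
  simp [List.contains_eq_mem]
  by_cases h : x = c <;> simp [h]

lemma pvA_loop (l : List Char) (S : PySem.Set Char) (pre : List Char) (acc : List String)
    (hm : ∀ c, "aeiouyAEIOUY".toList.contains c = true → (S.contains c = pre.contains c)) :
    (l.foldl (fun (st : PySem.Set Char × List String) char =>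
      if "aeiouyAEIOUY".toList.contains char then
        if !(PySem.Set.contains st.1 char) then
          (PySem.Set.add st.1 char, st.2)
        else
          (st.1, st.2 ++ [String.mk [char]])
      else
        (st.1, st.2 ++ [String.mk [char]])) (S, acc)).2 = acc ++ pvSpecGo pre l := by
  induction l generalizing S pre acc with
  | nil => simp [pvSpecGo]
  | cons c t ih =>
    simp only [List.foldl, pvSpecGo]
    by_cases hv : "aeiouyAEIOUY".toList.contains c = true
    · by_cases hp : pre.contains c = true
      · have hS : S.contains c = true := by rw [hm c hv]; exact hp
        simp only [hv, hS, hp, if_true, Bool.not_true, Bool.false_eq_true, if_false,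
          Bool.and_false]
        rw [ih S (pre ++ [c]) _ (fun x hx => by
          rw [hm x hx, pvContains_append]
          by_cases hxc : x = c
          · subst hxc; rw [hp]; simp
          · simp [hxc])]
        simp
      · have hp' : pre.contains c = false := by simpa using hp
        have hS : S.contains c = false := by rw [hm c hv]; exact hp'
        simp only [hv, hS, hp', if_true, Bool.not_false, Bool.true_and]
        rw [ih (PySem.Set.add S c) (pre ++ [c]) acc ?_]
        intro x hx
        have hadd : PySem.Set.add S c = S ++ [c] := by
          apply PySem.Set.add_of_not_mem
          simpa [List.contains_eq_mem] using hS
        rw [hadd]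
        have h1 : (S ++ [c]).contains x = (S.contains x || x == c) := pvContains_append S c x
        have h2 : (pre ++ [c]).contains x = (pre.contains x || x == c) := pvContains_append pre c x
        simp only [PySem.Set.contains_eq_listContains] at *
        rw [h1, h2, hm x hx]
    · have hv' : "aeiouyAEIOUY".toList.contains c = false := by simpa using hv
      simp only [hv', Bool.false_eq_true, if_false, Bool.false_and]
      rw [ih S (pre ++ [c]) _ ?_]
      · simp
      · intro x hx
        rw [hm x hx, pvContains_append]
        have hxc : x ≠ c := by rintro rfl; rw [hx] at hv'; cases hv'
        simp [hxc]

-- [v] is a prefix of l iff l starts with v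
lemma pvSingle_prefix (v : Char) (l : List Char) : [v] <+: l ↔ ∃ t, l = v :: t := by
  constructor
  · rintro ⟨t, rfl⟩; exact ⟨t, rfl⟩
  · rintro ⟨t, rfl⟩; exact ⟨t, rfl⟩

-- find of a single character hits exactly the first occurrence
lemma pvFind_single (pre : List Char) (c : Char) (t : List Char) (v : Char) (hv : v ∈ pre ++ c :: t) :
    PySem.Chars.find (pre ++ c :: t) [v] = (pre.length : Int) ↔ (v = c ∧ v ∉ pre) := by
  set cs := pre ++ c :: t with hcs
  have hinfix : [v] <:+: cs := (List.singleton_infix_iff v cs).mpr hv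
  have hnn : 0 ≤ PySem.Chars.find cs [v] := (PySem.Chars.find_nonneg_iff cs [v]).mpr hinfix
  obtain ⟨hpref, hmin⟩ := PySem.Chars.find_spec (s := cs) (sub := [v]) hnn
  constructor
  · intro heq
    rw [heq] at hpref hmin
    simp only [Int.toNat_natCast] at hpref hmin
    rw [hcs, List.drop_append_of_le_length (le_refl _), List.drop_length, List.nil_append] at hpref
    obtain ⟨t', ht'⟩ := (pvSingle_prefix v _).mp hpref
    refine ⟨by injection ht' with h1 _; exact h1.symm, ?_⟩
    intro hvpre
    obtain ⟨j, hj, hjv⟩ := List.getElem_of_mem hvpre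
    refine hmin j (by exact_mod_cast hj) ?_
    rw [pvSingle_prefix]
    refine ⟨pre.drop (j+1) ++ c :: t, ?_⟩
    rw [hcs, List.drop_append_of_le_length (le_of_lt hj)]
    rw [← List.getElem_cons_drop hj, hjv]
    simp
  · rintro ⟨rfl, hvpre⟩
    set j := (PySem.Chars.find cs [v]).toNat with hj
    have hfval : PySem.Chars.find cs [v] = (j : Int) := (Int.toNat_of_nonneg hnn).symm
    rw [hfval]
    have hple : ¬ (j < pre.length) := by
      intro hlt
      obtain ⟨t', ht'⟩ := (pvSingle_prefix v _).mp hpref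
      have : cs[j]? = some v := by
        have h0 := congrArg (fun l => l[0]?) ht'
        simpa [List.getElem?_drop] using h0
      rw [hcs, List.getElem?_append_left hlt] at this
      exact hvpre (List.mem_of_getElem? this)
    have hnlt : ¬ (pre.length < j) := by
      intro hlt
      refine hmin pre.length (by exact_mod_cast hlt) ?_
      rw [pvSingle_prefix]
      exact ⟨t, by rw [hcs, List.drop_append_of_le_length (le_refl _), List.drop_length, List.nil_append]⟩
    have : j = pre.length := by omega
    exact_mod_cast this

-- membership in B's drop set, at the index right after a prefix
lemma pvDrop_mem (pre : List Char) (c : Char) (t : List Char) :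
    PySem.Set.contains
      (PySem.Set.ofList (("aeiouyAEIOUY".toList.filter (fun v => (pre ++ c :: t).contains v)).map
        (fun v => PySem.Chars.find (pre ++ c :: t) [v])))
      ((pre.length : Int))
      = ("aeiouyAEIOUY".toList.contains c && !(pre.contains c)) := by
  have key : ((pre.length : Int) ∈
      (PySem.Set.ofList (("aeiouyAEIOUY".toList.filter (fun v => (pre ++ c :: t).contains v)).map
        (fun v => PySem.Chars.find (pre ++ c :: t) [v]))))
      ↔ (c ∈ "aeiouyAEIOUY".toList ∧ c ∉ pre) := by
    rw [PySem.Set.mem_ofList]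
    constructor
    · intro hmem
      obtain ⟨v, hvmem, hfind⟩ := List.mem_map.mp hmem
      obtain ⟨hv1, hv2⟩ := List.mem_filter.mp hvmem
      have hv2' : v ∈ pre ++ c :: t := by simpa [List.contains_eq_mem] using hv2
      obtain ⟨rfl, hnp⟩ := (pvFind_single pre c t v hv2').mp hfind
      exact ⟨hv1, hnp⟩
    · rintro ⟨h1, h2⟩
      exact List.mem_map.mpr ⟨c, List.mem_filter.mpr ⟨h1, by simp⟩,
        (pvFind_single pre c t c (by simp)).mpr ⟨rfl, h2⟩⟩
  rw [PySem.Set.contains_eq_listContains, List.contains_eq_mem, decide_eq_decide.mpr key]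
  by_cases h1 : c ∈ "aeiouyAEIOUY".toList <;> by_cases h2 : c ∈ pre <;>
    simp [h1, h2, List.contains_eq_mem]
  infer_instance

lemma pvB_loop (pre rest : List Char) :
    ((PySem.List.enumerate rest (pre.length : Int)).filter
        (fun p => !(PySem.Set.contains
          (PySem.Set.ofList (("aeiouyAEIOUY".toList.filter (fun v => (pre ++ rest).contains v)).map
            (fun v => PySem.Chars.find (pre ++ rest) [v]))) p.1))).map (fun p => String.mk [p.2])
      = pvSpecGo pre rest := by
  induction rest generalizing pre with
  | nil => simp [PySem.List.enumerate_nil, pvSpecGo]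
  | cons c t ih =>
    rw [PySem.List.enumerate_cons]
    simp only [List.filter_cons, pvSpecGo]
    have hd := pvDrop_mem pre c t
    have hlen : (pre.length : Int) + 1 = ((pre ++ [c]).length : Int) := by simp
    have hrw : pre ++ c :: t = (pre ++ [c]) ++ t := by simp
    by_cases hb : ("aeiouyAEIOUY".toList.contains c && !(pre.contains c)) = true
    · simp only [hd, hb, Bool.not_true, Bool.false_eq_true, if_false, if_true]
      rw [hlen, hrw]
      exact ih (pre ++ [c])
    · have hb' : ("aeiouyAEIOUY".toList.contains c && !(pre.contains c)) = false := by
        simpa using hb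
      simp only [hd, hb', Bool.not_false, Bool.false_eq_true, if_true, if_false, List.map_cons]
      rw [hlen, hrw]
      exact congrArg (String.mk [c] :: ·) (ih (pre ++ [c]))

-- ===== VERDICT (by name: the statement is the Claim_ definition above) =====
theorem remove_vowels_once_spec : Claim_equal_remove_vowels_once := by
  intro word _
  unfold Spec_remove_vowels_once remove_vowels_once remove_vowels_once_alt
  rw [pvA_loop word.toList PySem.Set.empty [] [] (by intro c _; rfl)]
  rw [List.nil_append]
  exact (pvB_loop [] word.toList).symm
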